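-- pv_equiv track=rewrite | github.com/Zhang-Wen-chao/Computer-Systems | LeetCode/58/2.py | StringSplit
-- ===== SOURCE A (Python) =====
-- def StringSplit(str ):
--     # write code here
--     n = len(str)
--     prefix_a = [0] * n
--     prefix_b = [0] * n
--     if str[0] == 'a':
--         prefix_a[0] = 1
--     else:
--         prefix_b[0] = 1
--     for i in range(1,n):
--         if str[i] == 'a':
--             prefix_a[i] = prefix_a[i-1] +1
--             prefix_b[i] = prefix_b[i-1]
--         else:
--             prefix_b[i] = prefix_b[i-1] +1
--             prefix_a[i] = prefix_a[i-1]
--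
--     total_b = prefix_b[-1]
--     max_score = 0
--     for i in range(1,n):
--         left_a = prefix_a[i-1]
--         right_b = total_b - prefix_b[i-1]
--         score = left_a + right_b
--         max_score = max(max_score, score)
--     return max_score
-- ===== SOURCE B (Python) =====
-- def StringSplit(str):
--     # One streaming pass: keep a running balance (#'a' - #non-'a') over the left
--     # part and fold the maximum of total_b + balance over all valid split points.
--     total_b = sum(1 for c in str if c != 'a')
--     res = 0
--     bal = 0
--     for c in str[:-1]:
--         bal += 1 if c == 'a' else -1
--         res = max(res, total_b + bal)
--     return res
-- ===== Notes on version B (the rewrite author's own statement) =====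
-- stated objective: simpler
-- what changed: Replaces the two preallocated prefix-count arrays and two index loops by a single streaming pass that keeps one scalar balance (#'a' minus #non-'a') and folds max(res, total_b + balance) over split points, using O(1) extra space.
import Mathlib
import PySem

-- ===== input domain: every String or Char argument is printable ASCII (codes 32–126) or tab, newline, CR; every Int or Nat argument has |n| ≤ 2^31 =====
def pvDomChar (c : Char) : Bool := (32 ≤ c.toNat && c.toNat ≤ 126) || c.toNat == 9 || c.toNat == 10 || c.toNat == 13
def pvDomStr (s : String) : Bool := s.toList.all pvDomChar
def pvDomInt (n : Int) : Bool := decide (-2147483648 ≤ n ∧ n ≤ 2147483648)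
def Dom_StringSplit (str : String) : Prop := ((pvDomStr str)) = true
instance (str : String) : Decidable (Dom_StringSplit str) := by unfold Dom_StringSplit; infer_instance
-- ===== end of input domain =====

-- B replaces A's two prefix-count arrays and two index loops by a single streaming
-- pass with one scalar balance (objective: simpler, O(1) extra space).

-- ===== PORT A =====
def StringSplit (str : String) : Int :=
  let s := str.toList
  let n := s.length
  let prefix_a : List Int := List.replicate n 0
  let prefix_b : List Int := List.replicate n 0
  -- str[0] raises IndexError on the empty string: excluded by Pre_ (default is unused inside Pre_)
  let init : List Int × List Int :=
    if PySem.List.pyGetD s 0 ' ' == 'a' then (PySem.List.pySetD prefix_a 0 1, prefix_b)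
    else (prefix_a, PySem.List.pySetD prefix_b 0 1)
  let arrs : List Int × List Int :=
    (PySem.List.pyRange 1 n 1).foldl (fun st i =>
      if PySem.List.pyGetD s i ' ' == 'a' then
        (PySem.List.pySetD st.1 i (PySem.List.pyGetD st.1 (i-1) 0 + 1),
         PySem.List.pySetD st.2 i (PySem.List.pyGetD st.2 (i-1) 0))
      else
        (PySem.List.pySetD st.1 i (PySem.List.pyGetD st.1 (i-1) 0),
         PySem.List.pySetD st.2 i (PySem.List.pyGetD st.2 (i-1) 0 + 1))) init
  let total_b := PySem.List.pyGetD arrs.2 (-1) 0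
  (PySem.List.pyRange 1 n 1).foldl (fun max_score i =>
    let left_a := PySem.List.pyGetD arrs.1 (i-1) 0
    let right_b := total_b - PySem.List.pyGetD arrs.2 (i-1) 0
    max max_score (left_a + right_b)) 0

-- ===== PORT B =====
def StringSplit_alt (str : String) : Int :=
  let s := str.toList
  let total_b : Int := s.foldl (fun acc c => if c ≠ 'a' then acc + 1 else acc) 0
  let fin : Int × Int := s.dropLast.foldl (fun st c =>
    let bal := st.2 + (if c = 'a' then 1 else -1)
    (max st.1 (total_b + bal), bal)) (0, 0)
  fin.1

-- ===== PRECONDITION & SPEC =====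
-- Pre_ excludes only the empty string, on which A raises IndexError at str[0].
def Pre_StringSplit (str : String) : Prop := str.toList ≠ []
instance (str : String) : Decidable (Pre_StringSplit str) := by unfold Pre_StringSplit; infer_instance
def pvWitness_StringSplit : String := "abab"

def Spec_StringSplit (str : String) (out : Int) : Prop := out = StringSplit_alt str
instance (str : String) (out : Int) : Decidable (Spec_StringSplit str out) := by unfold Spec_StringSplit; infer_instance

-- ===== CLAIM (what is proved, stated in full; the proofs are below) =====
def Claim_equal_StringSplit : Prop := ∀ (str : String), Dom_StringSplit str → Pre_StringSplit str → Spec_StringSplit str (StringSplit str)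

-- ===== LEMMAS AND PROOFS =====

def aCnt (s : List Char) (m : Nat) : Int := ((s.take m).countP (fun c => c == 'a') : Int)
def bCnt (s : List Char) (m : Nat) : Int := ((s.take m).countP (fun c => !(c == 'a')) : Int)

def bestAux (G : Int → Int) : Nat → Int
  | 0 => 0
  | k+1 => max (bestAux G k) (G ((k : Int)+1))

lemma aCnt_succ (s : List Char) (m : Nat) (h : m < s.length) :
    aCnt s (m+1) = aCnt s m + (if s[m] == 'a' then 1 else 0) := by
  unfold aCnt
  rw [List.take_add_one, List.getElem?_eq_getElem h]
  by_cases hc : s[m] == 'a' <;>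
    simp only [List.countP_append, List.countP_cons, List.countP_nil, Option.toList_some,
      hc, if_true, if_false, Bool.false_eq_true, cond_true, cond_false] <;> push_cast <;> omega

lemma bCnt_succ (s : List Char) (m : Nat) (h : m < s.length) :
    bCnt s (m+1) = bCnt s m + (if s[m] == 'a' then 0 else 1) := by
  unfold bCnt
  rw [List.take_add_one, List.getElem?_eq_getElem h]
  by_cases hc : s[m] == 'a' <;>
    simp only [List.countP_append, List.countP_cons, List.countP_nil, Option.toList_some,
      hc, if_true, if_false, Bool.not_true, Bool.not_false, Bool.false_eq_true, cond_true, cond_false] <;> push_cast <;> omega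

lemma bestAux_congr (G1 G2 : Int → Int) (k : Nat)
    (h : ∀ j : Nat, 1 ≤ j → j ≤ k → G1 (j : Int) = G2 (j : Int)) :
    bestAux G1 k = bestAux G2 k := by
  induction k with
  | zero => rfl
  | succ k ih =>
    unfold bestAux
    rw [ih (fun j h1 h2 => h j h1 (Nat.le_succ_of_le h2))]
    have := h (k+1) (by omega) (by omega)
    push_cast at this
    rw [this]

lemma fold_to_bestAux (G : Int → Int) (k : Nat) :
    (PySem.List.pyRange 1 ((k : Int)+1) 1).foldl (fun m i => max m (G i)) 0 = bestAux G k := by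
  induction k with
  | zero => simp [PySem.List.pyRange_one_eq_nil, bestAux]
  | succ k ih =>
    rw [show ((k+1 : Nat) : Int) + 1 = ((k:Int)+1) + 1 by push_cast; ring,
        PySem.List.pyRange_one_succ_right (by omega), List.foldl_append]
    simp [bestAux, ih]

def initA (s : List Char) : List Int × List Int :=
  if PySem.List.pyGetD s 0 ' ' == 'a'
  then (PySem.List.pySetD (List.replicate s.length (0:Int)) 0 1, List.replicate s.length (0:Int))
  else (List.replicate s.length (0:Int), PySem.List.pySetD (List.replicate s.length (0:Int)) 0 1)

def stepA (s : List Char) (st : List Int × List Int) (i : Int) : List Int × List Int :=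
  if PySem.List.pyGetD s i ' ' == 'a' then
    (PySem.List.pySetD st.1 i (PySem.List.pyGetD st.1 (i-1) 0 + 1),
     PySem.List.pySetD st.2 i (PySem.List.pyGetD st.2 (i-1) 0))
  else
    (PySem.List.pySetD st.1 i (PySem.List.pyGetD st.1 (i-1) 0),
     PySem.List.pySetD st.2 i (PySem.List.pyGetD st.2 (i-1) 0 + 1))

lemma foldA_inv (s : List Char) (hn : s ≠ []) (k : Nat) (hk1 : 1 ≤ k) (hk : k ≤ s.length) :
    ((PySem.List.pyRange 1 (k:Int) 1).foldl (stepA s) (initA s)).1.length = s.length ∧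
    ((PySem.List.pyRange 1 (k:Int) 1).foldl (stepA s) (initA s)).2.length = s.length ∧
    ∀ j : Nat, j < k →
      PySem.List.pyGetD ((PySem.List.pyRange 1 (k:Int) 1).foldl (stepA s) (initA s)).1 (j:Int) 0 = aCnt s (j+1) ∧
      PySem.List.pyGetD ((PySem.List.pyRange 1 (k:Int) 1).foldl (stepA s) (initA s)).2 (j:Int) 0 = bCnt s (j+1) := by
  have hlen : 0 < s.length := List.length_pos_iff.mpr hn
  induction k, hk1 using Nat.le_induction with
  | base =>
    rw [show ((1:Nat):Int) = 1 by norm_cast, PySem.List.pyRange_one_eq_nil (le_refl 1)]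
    simp only [List.foldl_nil]
    obtain ⟨c, t, rfl⟩ := List.exists_cons_of_ne_nil hn
    have h0 : PySem.List.pyGetD (c :: t) (0:Int) ' ' = c := by
      simp [PySem.List.pyGetD_zero_cons]
    unfold initA
    by_cases hc : c == 'a' <;>
      simp [h0, hc, aCnt, bCnt, PySem.List.pySetD_of_nonneg, List.getD] <;>
      intro j hj <;> omega
  | succ k hk1' ih =>
    have hklen : k < s.length := by omega
    have ih' := ih (by omega)
    rw [show ((k+1:Nat):Int) = (k:Int) + 1 by push_cast; ring,
        PySem.List.pyRange_one_succ_right (by exact_mod_cast hk1'), List.foldl_append,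
        List.foldl_cons, List.foldl_nil]
    set st := (PySem.List.pyRange 1 (k:Int) 1).foldl (stepA s) (initA s) with hst
    obtain ⟨hl1, hl2, hinv⟩ := ih'
    have hsk : PySem.List.pyGetD s (k:Int) ' ' = s[k] := by
      rw [PySem.List.pyGetD_natCast, List.getD_eq_getElem _ _ hklen]
    have hread1 : PySem.List.pyGetD st.1 ((k:Int)-1) 0 = aCnt s k := by
      rw [show (k:Int)-1 = ((k-1:Nat):Int) by push_cast [Nat.cast_sub hk1']; ring]
      have := (hinv (k-1) (by omega)).1
      rwa [Nat.sub_add_cancel hk1'] at this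
    have hread2 : PySem.List.pyGetD st.2 ((k:Int)-1) 0 = bCnt s k := by
      rw [show (k:Int)-1 = ((k-1:Nat):Int) by push_cast [Nat.cast_sub hk1']; ring]
      have := (hinv (k-1) (by omega)).2
      rwa [Nat.sub_add_cancel hk1'] at this
    unfold stepA
    rw [hsk]
    by_cases hc : s[k] == 'a' <;> simp only [hc, if_true, if_false, Bool.false_eq_true] <;>
      refine ⟨by simp [PySem.List.length_pySetD, hl1], by simp [PySem.List.length_pySetD, hl2], ?_⟩ <;>
      intro j hj <;>
      rw [PySem.List.pyGetD_pySetD_natCast _ k j _ _ (by rw [hl1]; exact hklen),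
          PySem.List.pyGetD_pySetD_natCast _ k j _ _ (by rw [hl2]; exact hklen)] <;>
      rcases Nat.lt_or_ge j k with hjk | hjk
    · rw [if_neg (by exact_mod_cast Nat.ne_of_lt hjk), if_neg (by exact_mod_cast Nat.ne_of_lt hjk)]
      exact hinv j hjk
    · have hjk' : j = k := by omega
      subst hjk'
      rw [if_pos rfl, if_pos rfl, hread1, hread2, aCnt_succ s j hklen, bCnt_succ s j hklen]
      simp [hc]
    · rw [if_neg (by exact_mod_cast Nat.ne_of_lt hjk), if_neg (by exact_mod_cast Nat.ne_of_lt hjk)]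
      exact hinv j hjk
    · have hjk' : j = k := by omega
      subst hjk'
      rw [if_pos rfl, if_pos rfl, hread1, hread2, aCnt_succ s j hklen, bCnt_succ s j hklen]
      simp [hc]

def stepB (tb : Int) (st : Int × Int) (c : Char) : Int × Int :=
  let bal := st.2 + (if c = 'a' then 1 else -1)
  (max st.1 (tb + bal), bal)

lemma countB_foldl (t : List Char) (acc : Int) :
    t.foldl (fun acc c => if c ≠ 'a' then acc + 1 else acc) acc
      = acc + (t.countP (fun c => !(c == 'a')) : Int) := by
  induction t generalizing acc with
  | nil => simp
  | cons c t ih =>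
    rw [List.foldl_cons, ih, List.countP_cons]
    by_cases hc : c = 'a' <;> simp [hc] <;> push_cast <;> ring

lemma foldB_inv (s : List Char) (tb : Int) (m : Nat) (hm : m ≤ s.length) :
    (s.take m).foldl (stepB tb) (0, 0)
      = (bestAux (fun i => tb + (aCnt s i.toNat - bCnt s i.toNat)) m,
         aCnt s m - bCnt s m) := by
  induction m with
  | zero => simp [bestAux, aCnt, bCnt]
  | succ m ih =>
    have hmlen : m < s.length := by omega
    rw [List.take_add_one, List.getElem?_eq_getElem hmlen, Option.toList_some,
        List.foldl_append, ih (by omega), List.foldl_cons, List.foldl_nil]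
    have ht : ((m:Int) + 1).toNat = m + 1 := by omega
    rw [show bestAux (fun i => tb + (aCnt s i.toNat - bCnt s i.toNat)) (m+1)
          = max (bestAux (fun i => tb + (aCnt s i.toNat - bCnt s i.toNat)) m)
              (tb + (aCnt s (((m:Nat)+1:Int)).toNat - bCnt s (((m:Nat)+1:Int)).toNat)) from rfl,
        ht, aCnt_succ s m hmlen, bCnt_succ s m hmlen]
    by_cases hc : s[m] = 'a' <;>
      simp only [stepB, hc, beq_iff_eq, if_true, if_false, ite_true, ite_false, Prod.mk.injEq,
        reduceIte, beq_self_eq_true] <;>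
      exact ⟨by congr 1 <;> ring, by ring⟩


theorem StringSplit_spec : Claim_equal_StringSplit := by
  intro str _ h
  unfold Spec_StringSplit
  set s := str.toList with hs
  have hlen : 0 < s.length := List.length_pos_iff.mpr h
  set n := s.length with hn
  -- full A-side array facts
  obtain ⟨hl1, hl2, hinv⟩ := foldA_inv s h n (by omega) (le_refl n)
  set arrs := (PySem.List.pyRange 1 (n:Int) 1).foldl (stepA s) (initA s) with harrs
  have htotal : PySem.List.pyGetD arrs.2 (-1) 0 = bCnt s n := by
    rw [PySem.List.pyGetD_neg_ofNat arrs.2 1 0 (by omega) (by omega),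
        ← List.getD_eq_getElem arrs.2 0 (by omega), hl2]
    have h9 := (hinv (n-1) (by omega)).2
    rw [PySem.List.pyGetD_natCast, Nat.sub_add_cancel (by omega)] at h9
    rw [← hn]
    exact h9
  -- A's value
  have hA : StringSplit str = bestAux
      (fun i => PySem.List.pyGetD arrs.1 (i-1) 0 + (bCnt s n - PySem.List.pyGetD arrs.2 (i-1) 0))
      (n-1) := by
    show (PySem.List.pyRange 1 (n:Int) 1).foldl (fun max_score i =>
        max max_score (PySem.List.pyGetD arrs.1 (i-1) 0 +
          (PySem.List.pyGetD arrs.2 (-1) 0 - PySem.List.pyGetD arrs.2 (i-1) 0))) 0 = _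
    rw [htotal, show ((n:Nat):Int) = ((n-1:Nat):Int) + 1 by omega]
    exact fold_to_bestAux _ (n-1)
  -- B's value
  have htb : s.foldl (fun acc c => if c ≠ 'a' then acc + 1 else acc) 0 = bCnt s n := by
    rw [countB_foldl]
    simp [bCnt, hn, List.take_length]
  have hB : StringSplit_alt str = bestAux
      (fun i => bCnt s n + (aCnt s i.toNat - bCnt s i.toNat)) (n-1) := by
    show (s.dropLast.foldl (stepB (s.foldl (fun acc c => if c ≠ 'a' then acc + 1 else acc) 0)) (0,0)).1 = _
    rw [htb, List.dropLast_eq_take, ← hn, foldB_inv s (bCnt s n) (n-1) (by omega)]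
  rw [hA, hB]
  have hcongr : ∀ j : Nat, 1 ≤ j → j ≤ n - 1 →
      PySem.List.pyGetD arrs.1 ((j:Int)-1) 0 + (bCnt s n - PySem.List.pyGetD arrs.2 ((j:Int)-1) 0)
        = bCnt s n + (aCnt s ((j:Int)).toNat - bCnt s ((j:Int)).toNat) := by
    intro j hj1 hj2
    have hcast : ((j:Int)) - 1 = ((j-1:Nat):Int) := by omega
    have h1 := (hinv (j-1) (by omega)).1
    have h2 := (hinv (j-1) (by omega)).2
    rw [Nat.sub_add_cancel hj1] at h1 h2
    rw [hcast, h1, h2, show ((j:Int)).toNat = j by omega]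
    ring
  exact bestAux_congr _ _ (n-1) (fun j hj1 hj2 => by
    simpa using hcongr j hj1 hj2)
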